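-- pv_equiv track=rewrite | github.com/prepare-coding-test-in-42/bogeoung_coding_test | Baekjoon/BeadEscape_13460.py | find_color_bead
-- ===== SOURCE A (Python) =====
-- BLUE_BEAD = "B"
--
-- RED_BEAD = "R"
--
-- def find_color_bead(input_arr):
--     r_loc, b_loc = [], []
--     for row in range(len(input_arr)):
--         for col in range(len(input_arr[row])):
--             if input_arr[row][col] == RED_BEAD:
--                 r_loc = [row, col]
--             elif input_arr[row][col] == BLUE_BEAD:
--                 b_loc = [row, col]
--
--     return r_loc, b_loc
-- ===== SOURCE B (Python) =====
-- RED_BEAD = "R"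
-- BLUE_BEAD = "B"
--
-- def find_color_bead(input_arr):
--     r_loc, b_loc = [], []
--     r_found = b_found = False
--     for row, line in reversed(list(enumerate(input_arr))):
--         for col, ch in reversed(list(enumerate(line))):
--             if ch == RED_BEAD and not r_found:
--                 r_loc, r_found = [row, col], True
--             elif ch == BLUE_BEAD and not b_found:
--                 b_loc, b_found = [row, col], True
--             if r_found and b_found:
--                 return r_loc, b_loc
--     return r_loc, b_loc
-- ===== Notes on version B (the rewrite author's own statement) =====
-- stated objective: alternative
-- what changed: Replaces A's full forward sweep that overwrites the locations on every match with a backward scan (rows and columns in reverse) that records the first R/B seen, maintains found-flags and returns as soon as both beads are located.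
import Mathlib
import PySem

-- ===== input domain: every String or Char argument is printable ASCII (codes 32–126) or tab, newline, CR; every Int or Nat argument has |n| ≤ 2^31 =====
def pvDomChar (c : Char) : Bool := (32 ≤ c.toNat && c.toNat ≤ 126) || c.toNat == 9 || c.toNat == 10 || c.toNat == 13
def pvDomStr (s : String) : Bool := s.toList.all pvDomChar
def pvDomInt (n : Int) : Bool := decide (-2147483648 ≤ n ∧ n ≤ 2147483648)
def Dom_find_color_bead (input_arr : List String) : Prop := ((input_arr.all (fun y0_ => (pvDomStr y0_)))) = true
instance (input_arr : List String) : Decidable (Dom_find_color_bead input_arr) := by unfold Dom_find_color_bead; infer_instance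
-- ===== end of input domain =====

-- B replaces A's full forward overwrite sweep by a backward scan with found-flags and early
-- termination once both beads are located (objective: alternative, same asymptotic cost).

-- ===== PORT A =====
-- loop body of A's inner for-loop: overwrite r_loc / b_loc on each match
def pvStepA (st : List Int × List Int) (c : (Int × Int) × Char) : List Int × List Int :=
  if c.2 = 'R' then ([c.1.1, c.1.2], st.2)
  else if c.2 = 'B' then (st.1, [c.1.1, c.1.2])
  else st

def find_color_bead (input_arr : List String) : List Int × List Int :=
  (PySem.List.pyRange 0 (PySem.List.len input_arr)).foldl
    (fun st row =>
      (PySem.List.pyRange 0 (PySem.Str.len (PySem.List.pyGetD input_arr row ""))).foldl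
        (fun st col =>
          pvStepA st ((row, col), PySem.List.pyGetD (PySem.List.pyGetD input_arr row "").toList col ' '))
        st)
    ([], [])

-- ===== PORT B =====
-- loop body of B's inner for-loop: record first match seen (scanning backwards), set flag
def pvStepB (st : (List Int × List Int) × Bool × Bool) (c : (Int × Int) × Char) :
    (List Int × List Int) × Bool × Bool :=
  if c.2 = 'R' ∧ st.2.1 = false then (([c.1.1, c.1.2], st.1.2), true, st.2.2)
  else if c.2 = 'B' ∧ st.2.2 = false then ((st.1.1, [c.1.1, c.1.2]), st.2.1, true)
  else st

-- inner loop: reversed enumerate of one line, early return when both flags set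
def pvScanCols (row : Int) : List (Int × Char) → ((List Int × List Int) × Bool × Bool) →
    ((List Int × List Int) × Bool × Bool)
  | [], st => st
  | (col, ch) :: rest, st =>
    let st' := pvStepB st ((row, col), ch)
    if st'.2.1 && st'.2.2 then st' else pvScanCols row rest st'

-- outer loop: reversed enumerate of the rows, early return when both flags set
def pvScanRows : List (Int × String) → ((List Int × List Int) × Bool × Bool) →
    ((List Int × List Int) × Bool × Bool)
  | [], st => st
  | (row, line) :: rest, st =>
    let st' := pvScanCols row (PySem.List.enumerate line.toList).reverse st
    if st'.2.1 && st'.2.2 then st' else pvScanRows rest st'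

def find_color_bead_alt (input_arr : List String) : List Int × List Int :=
  (pvScanRows (PySem.List.enumerate input_arr).reverse (([], []), false, false)).1

-- ===== PRECONDITION & SPEC =====
def Spec_find_color_bead (input_arr : List String) (out : List Int × List Int) : Prop := out = find_color_bead_alt input_arr
instance (input_arr : List String) (out : List Int × List Int) : Decidable (Spec_find_color_bead input_arr out) := by unfold Spec_find_color_bead; infer_instance

-- ===== CLAIM (what is proved, stated in full; the proofs are below) =====
def Claim_equal_find_color_bead : Prop := ∀ (input_arr : List String), Dom_find_color_bead input_arr → Spec_find_color_bead input_arr (find_color_bead input_arr)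

-- ===== LEMMAS AND PROOFS =====

-- the grid flattened to cells ((row, col), char), in forward order
def pvCells (input_arr : List String) : List ((Int × Int) × Char) :=
  (PySem.List.enumerate input_arr).flatMap
    (fun p => (PySem.List.enumerate p.2.toList).map (fun q => ((p.1, q.1), q.2)))

def pvMk (c : (Int × Int) × Char) : List Int := [c.1.1, c.1.2]

theorem pvFoldlFlatMap {α β γ : Type} (l : List α) (f : α → List β) (g : γ → β → γ) (init : γ) :
    (l.flatMap f).foldl g init = l.foldl (fun acc x => (f x).foldl g acc) init := by
  induction l generalizing init with
  | nil => rfl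
  | cons x t ih => simp [List.flatMap_cons, List.foldl_append, ih]

theorem pvLemA (input_arr : List String) :
    find_color_bead input_arr = (pvCells input_arr).foldl pvStepA ([], []) := by
  unfold find_color_bead pvCells
  rw [pvFoldlFlatMap, PySem.List.enumerate_eq_map_pyRange input_arr "", List.foldl_map]
  congr 1
  funext st j
  rw [List.foldl_map, PySem.List.enumerate_eq_map_pyRange _ ' ', List.foldl_map]
  simp [PySem.Str.len, PySem.List.len]

theorem pvStepB_saturated (st : (List Int × List Int) × Bool × Bool) (c : (Int × Int) × Char)
    (h1 : st.2.1 = true) (h2 : st.2.2 = true) : pvStepB st c = st := by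
  simp [pvStepB, h1, h2]

theorem pvFoldlB_saturated {α : Type} (g : α → (Int × Int) × Char) (M : List α)
    (st : (List Int × List Int) × Bool × Bool) (h1 : st.2.1 = true) (h2 : st.2.2 = true) :
    M.foldl (fun st q => pvStepB st (g q)) st = st := by
  induction M with
  | nil => rfl
  | cons x t ih => simp [List.foldl_cons, pvStepB_saturated st (g x) h1 h2, ih]

theorem pvScanCols_eq (row : Int) (cols : List (Int × Char))
    (st : (List Int × List Int) × Bool × Bool) :
    pvScanCols row cols st = cols.foldl (fun st q => pvStepB st ((row, q.1), q.2)) st := by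
  induction cols generalizing st with
  | nil => rfl
  | cons x t ih =>
    obtain ⟨col, ch⟩ := x
    show (let st' := pvStepB st ((row, col), ch);
          if st'.2.1 && st'.2.2 then st' else pvScanCols row t st') = _
    by_cases h : ((pvStepB st ((row, col), ch)).2.1 && (pvStepB st ((row, col), ch)).2.2) = true
    · have h' := h; rw [Bool.and_eq_true] at h'
      rw [if_pos h, List.foldl_cons]
      exact (pvFoldlB_saturated (fun q : Int × Char => ((row, q.1), q.2)) t _ h'.1 h'.2).symm
    · rw [if_neg h, ih, List.foldl_cons]

theorem pvFoldlRowsB_saturated (t : List (Int × String))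
    (st : (List Int × List Int) × Bool × Bool) (h1 : st.2.1 = true) (h2 : st.2.2 = true) :
    t.foldl (fun st p => ((PySem.List.enumerate p.2.toList).reverse).foldl
      (fun st q => pvStepB st ((p.1, q.1), q.2)) st) st = st := by
  induction t with
  | nil => rfl
  | cons y s ih =>
    rw [List.foldl_cons,
      pvFoldlB_saturated (fun q : Int × Char => ((y.1, q.1), q.2)) _ st h1 h2, ih]

theorem pvScanRows_eq (rows : List (Int × String)) (st : (List Int × List Int) × Bool × Bool) :
    pvScanRows rows st = rows.foldl
      (fun st p => ((PySem.List.enumerate p.2.toList).reverse).foldl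
        (fun st q => pvStepB st ((p.1, q.1), q.2)) st) st := by
  induction rows generalizing st with
  | nil => rfl
  | cons x t ih =>
    obtain ⟨row, line⟩ := x
    show (let st' := pvScanCols row (PySem.List.enumerate line.toList).reverse st;
          if st'.2.1 && st'.2.2 then st' else pvScanRows t st') = _
    rw [pvScanCols_eq]
    by_cases h : (((PySem.List.enumerate line.toList).reverse.foldl
        (fun st q => pvStepB st ((row, q.1), q.2)) st).2.1 &&
        ((PySem.List.enumerate line.toList).reverse.foldl
        (fun st q => pvStepB st ((row, q.1), q.2)) st).2.2) = true
    · have h' := h; rw [Bool.and_eq_true] at h'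
      rw [if_pos h, List.foldl_cons]
      exact (pvFoldlRowsB_saturated t _ h'.1 h'.2).symm
    · rw [if_neg h, ih, List.foldl_cons]

theorem pvLemB (input_arr : List String) :
    find_color_bead_alt input_arr =
      ((pvCells input_arr).reverse.foldl pvStepB (([], []), false, false)).1 := by
  unfold find_color_bead_alt pvCells
  rw [pvScanRows_eq, List.reverse_flatMap, pvFoldlFlatMap]
  congr 2
  funext st p
  rw [Function.comp, ← List.map_reverse, List.foldl_map]

theorem pvCharA (L : List ((Int × Int) × Char)) (r b : List Int) :
    L.foldl pvStepA (r, b) =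
      (((L.reverse.find? (fun c => c.2 == 'R')).map pvMk).getD r,
       ((L.reverse.find? (fun c => c.2 == 'B')).map pvMk).getD b) := by
  induction L generalizing r b with
  | nil => rfl
  | cons x t ih =>
    rw [List.foldl_cons, List.reverse_cons, List.find?_append, List.find?_append]
    by_cases hR : x.2 = 'R'
    · have hR' : (x.2 == 'R') = true := by rw [hR]; decide
      have hB' : (x.2 == 'B') = false := by rw [hR]; decide
      have : pvStepA (r, b) x = ([x.1.1, x.1.2], b) := by simp [pvStepA, hR]
      rw [this, ih]
      rcases hfr : t.reverse.find? (fun c => c.2 == 'R') with _ | c <;>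
        rcases hfb : t.reverse.find? (fun c => c.2 == 'B') with _ | d <;>
        simp [hfr, hfb, List.find?, hR', hB', pvMk]
    · by_cases hB : x.2 = 'B'
      · have hR' : (x.2 == 'R') = false := by rw [hB]; decide
        have hB' : (x.2 == 'B') = true := by rw [hB]; decide
        have : pvStepA (r, b) x = (r, [x.1.1, x.1.2]) := by simp [pvStepA, hB]
        rw [this, ih]
        rcases hfr : t.reverse.find? (fun c => c.2 == 'R') with _ | c <;>
          rcases hfb : t.reverse.find? (fun c => c.2 == 'B') with _ | d <;>
          simp [hfr, hfb, List.find?, hR', hB', pvMk]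
      · have hR' : (x.2 == 'R') = false := by simp [hR]
        have hB' : (x.2 == 'B') = false := by simp [hB]
        have : pvStepA (r, b) x = (r, b) := by simp [pvStepA, hR, hB]
        rw [this, ih]
        rcases hfr : t.reverse.find? (fun c => c.2 == 'R') with _ | c <;>
          rcases hfb : t.reverse.find? (fun c => c.2 == 'B') with _ | d <;>
          simp [hfr, hfb, List.find?, hR', hB']

theorem pvCharB (M : List ((Int × Int) × Char)) (r b : List Int) (rf bf : Bool) :
    M.foldl pvStepB ((r, b), rf, bf) =
      ((if rf then r else ((M.find? (fun c => c.2 == 'R')).map pvMk).getD r,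
        if bf then b else ((M.find? (fun c => c.2 == 'B')).map pvMk).getD b),
       rf || M.any (fun c => c.2 == 'R'), bf || M.any (fun c => c.2 == 'B')) := by
  induction M generalizing r b rf bf with
  | nil => simp
  | cons x t ih =>
    rw [List.foldl_cons]
    by_cases hR : x.2 = 'R'
    · have hR' : (x.2 == 'R') = true := by rw [hR]; decide
      have hB' : (x.2 == 'B') = false := by rw [hR]; decide
      cases rf with
      | false =>
        have : pvStepB ((r, b), false, bf) x = (([x.1.1, x.1.2], b), true, bf) := by
          simp [pvStepB, hR]
        rw [this, ih]
        simp [List.find?, List.any_cons, hR', hB', pvMk]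
      | true =>
        have : pvStepB ((r, b), true, bf) x = ((r, b), true, bf) := by
          simp [pvStepB, hR]
        rw [this, ih]
        simp [List.find?, List.any_cons, hR', hB']
    · by_cases hB : x.2 = 'B'
      · have hR' : (x.2 == 'R') = false := by rw [hB]; decide
        have hB' : (x.2 == 'B') = true := by rw [hB]; decide
        cases bf with
        | false =>
          have : pvStepB ((r, b), rf, false) x = ((r, [x.1.1, x.1.2]), rf, true) := by
            simp [pvStepB, hB]
          rw [this, ih]
          simp [List.find?, List.any_cons, hR', hB', pvMk]
        | true =>
          have : pvStepB ((r, b), rf, true) x = ((r, b), rf, true) := by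
            simp [pvStepB, hB]
          rw [this, ih]
          simp [List.find?, List.any_cons, hR', hB']
      · have hR' : (x.2 == 'R') = false := by simp [hR]
        have hB' : (x.2 == 'B') = false := by simp [hB]
        have : pvStepB ((r, b), rf, bf) x = ((r, b), rf, bf) := by
          simp [pvStepB, hR, hB]
        rw [this, ih]
        simp [List.find?, List.any_cons, hR', hB']

-- ===== VERDICT (by name: the statement is the Claim_ definition above) =====
theorem find_color_bead_spec : Claim_equal_find_color_bead := by
  intro input_arr _
  unfold Spec_find_color_bead
  rw [pvLemA, pvLemB, pvCharA, pvCharB]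
  simp
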